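-- pv_equiv track=rewrite | github.com/sunwupark/GrafanaLLM-AlertAnalyzer | app/utils/text.py | extract_analysis_sections
-- ===== SOURCE A (Python) =====
-- def extract_analysis_sections(content):
--     sections = {"problem": "", "cause": "", "solution": ""}
--
--     lines = content.split("\n")
--     current_section = None
--
--     for line in lines:
--         line = line.strip()
--
--         if line.lower().startswith("problem:"):
--             current_section = "problem"
--             sections["problem"] = line[8:].strip()
--         elif line.lower().startswith("cause of problem:"):
--             current_section = "cause"
--             sections["cause"] = line[16:].strip()
--         elif line.lower().startswith("solution:"):
--             current_section = "solution"
--             sections["solution"] = line[9:].strip()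
--         elif current_section and line:
--             sections[current_section] += " " + line
--
--     return sections
-- ===== SOURCE B (Python) =====
-- def extract_analysis_sections(content):
--     HEADERS = (("problem", "problem:", 8), ("cause", "cause of problem:", 16), ("solution", "solution:", 9))
--
--     def classify(line):
--         low = line.lower()
--         for key, prefix, offset in HEADERS:
--             if low.startswith(prefix):
--                 return key, line[offset:].strip()
--         return None
--
--     lines = [raw.strip() for raw in content.split("\n")]
--     sections = {"problem": "", "cause": "", "solution": ""}
--     i, n = 0, len(lines)
--     while i < n:
--         head = classify(lines[i])
--         if head is None:
--             i += 1
--             continue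
--         key, val = head
--         i += 1
--         while i < n and classify(lines[i]) is None:
--             if lines[i]:
--                 val += " " + lines[i]
--             i += 1
--         sections[key] = val
--     return sections
-- ===== Notes on version B (the rewrite author's own statement) =====
-- stated objective: alternative
-- what changed: A is a single fold carrying a current-section register and appending to the dict line by line; B first strips/classifies lines, then processes them header-block by header-block, building each section's whole value with an inner loop and writing it to the dict once per header.
import Mathlib
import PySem

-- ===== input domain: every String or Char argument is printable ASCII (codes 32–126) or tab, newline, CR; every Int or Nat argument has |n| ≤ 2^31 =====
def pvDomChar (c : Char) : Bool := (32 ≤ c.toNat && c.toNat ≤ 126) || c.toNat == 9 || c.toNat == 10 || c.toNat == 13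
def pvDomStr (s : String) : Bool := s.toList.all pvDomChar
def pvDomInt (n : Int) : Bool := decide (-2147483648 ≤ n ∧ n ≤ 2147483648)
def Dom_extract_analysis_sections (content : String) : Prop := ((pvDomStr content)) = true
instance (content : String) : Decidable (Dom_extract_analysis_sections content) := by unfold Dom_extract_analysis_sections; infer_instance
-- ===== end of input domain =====

-- B replaces A's single fold with a current-section register by a two-level grouping pass
-- (classify each line once, then build each section's whole value per header block); alternative, not faster.

-- ===== PORT A =====
-- one step of A's for-loop; state = (sections dict, current_section).
-- sections[current] += … is ported as Dict.modify with default "" — the default is never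
-- consulted, since current is always one of the three keys the dict is initialized with.
def pvStepA (st : PySem.Dict String String × Option String) (rawline : String) :
    PySem.Dict String String × Option String :=
  let line := PySem.Str.strip rawline
  if PySem.Str.startswith (PySem.Str.lower line) "problem:" then
    (st.1.insert "problem" (PySem.Str.strip (PySem.Str.slice line (some 8) none)), some "problem")
  else if PySem.Str.startswith (PySem.Str.lower line) "cause of problem:" then
    (st.1.insert "cause" (PySem.Str.strip (PySem.Str.slice line (some 16) none)), some "cause")
  else if PySem.Str.startswith (PySem.Str.lower line) "solution:" then
    (st.1.insert "solution" (PySem.Str.strip (PySem.Str.slice line (some 9) none)), some "solution")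
  else
    match st.2 with
    | some cur => if line ≠ "" then (st.1.modify cur "" (fun v => v ++ " " ++ line), some cur) else st
    | none => st

def extract_analysis_sections (content : String) : List (String × String) :=
  let sections : PySem.Dict String String :=
    PySem.Dict.ofList [("problem", ""), ("cause", ""), ("solution", "")]
  -- content.split("\n"): the separator is the non-empty literal "\n", so split? is always some
  let lines := (PySem.Str.split? content "\n").getD []
  ((lines.foldl pvStepA (sections, none)).1).items

-- ===== PORT B =====
-- classify(line): first matching (key, prefix, offset) of HEADERS, with the inline remainder.
def pvClassifyGo (line low : String) : List (String × String × Int) → Option (String × String)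
  | [] => none
  | (key, pfx, offset) :: rest =>
    if PySem.Str.startswith low pfx then
      some (key, PySem.Str.strip (PySem.Str.slice line (some offset) none))
    else pvClassifyGo line low rest

def pvClassify (line : String) : Option (String × String) :=
  pvClassifyGo line (PySem.Str.lower line)
    [("problem", "problem:", 8), ("cause", "cause of problem:", 16), ("solution", "solution:", 9)]

-- inner while: append the following non-empty plain lines to val until a header (or the end);
-- returns the finished section value and the unconsumed suffix.
def pvCollect : List String → String → String × List String
  | [], val => (val, [])
  | l :: rest, val =>
    match pvClassify l with
    | some _ => (val, l :: rest)
    | none => pvCollect rest (if l ≠ "" then val ++ " " ++ l else val)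

-- the unconsumed suffix pvCollect returns is never longer than its input (termination of pvGroup).
lemma pvCollect_len : ∀ (ls : List String) (val : String), (pvCollect ls val).2.length ≤ ls.length := by
  intro ls
  induction ls with
  | nil => intro val; simp [pvCollect]
  | cons l rest ih =>
    intro val
    simp only [pvCollect]
    cases pvClassify l with
    | some kv => simp
    | none => exact le_trans (ih _) (by simp)

-- outer while over the (pre-stripped) lines.
def pvGroup : List String → PySem.Dict String String → PySem.Dict String String
  | [], d => d
  | l :: rest, d =>
    match pvClassify l with
    | none => pvGroup rest d
    | some (key, val) =>
      let c := pvCollect rest val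
      pvGroup c.2 (d.insert key c.1)
  termination_by ls _ => ls.length
  decreasing_by
  · simp
  · exact Nat.lt_succ_of_le (pvCollect_len rest val)

def extract_analysis_sections_alt (content : String) : List (String × String) :=
  let lines := ((PySem.Str.split? content "\n").getD []).map PySem.Str.strip
  let sections : PySem.Dict String String :=
    PySem.Dict.ofList [("problem", ""), ("cause", ""), ("solution", "")]
  (pvGroup lines sections).items

-- ===== PRECONDITION & SPEC =====
def Spec_extract_analysis_sections (content : String) (out : List (String × String)) : Prop := out = extract_analysis_sections_alt content
instance (content : String) (out : List (String × String)) : Decidable (Spec_extract_analysis_sections content out) := by unfold Spec_extract_analysis_sections; infer_instance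

-- ===== CLAIM (what is proved, stated in full; the proofs are below) =====
def Claim_equal_extract_analysis_sections : Prop := ∀ (content : String), Dom_extract_analysis_sections content → Spec_extract_analysis_sections content (extract_analysis_sections content)

-- ===== LEMMAS AND PROOFS =====

-- A's loop step, written through B's classifier applied to the stripped line.
lemma pvStepA_eq (st : PySem.Dict String String × Option String) (l : String) :
    pvStepA st l =
      match pvClassify (PySem.Str.strip l) with
      | some kv => (st.1.insert kv.1 kv.2, some kv.1)
      | none =>
        match st.2 with
        | some cur =>
          if PySem.Str.strip l ≠ "" then
            (st.1.modify cur "" (fun v => v ++ " " ++ PySem.Str.strip l), some cur)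
          else st
        | none => st := by
  simp only [pvStepA, pvClassify, pvClassifyGo]
  split_ifs <;> rfl

-- the dict-level collapse A performs when appending to the freshly written section.
lemma pv_modify_insert (d : PySem.Dict String String) (k v : String) (f : String → String) :
    (d.insert k v).modify k "" f = d.insert k (f v) := by
  simp only [PySem.Dict.modify, PySem.Dict.getD_insert_self, PySem.Dict.insert_insert_self]

-- a block of A's loop with current = some key, right after sections[key] := val,
-- equals B's pvCollect over the stripped lines followed by the single insert.
lemma pv_block_eq (ls : List String) :
    ∀ (d : PySem.Dict String String) (key val : String),
    (ls.foldl pvStepA (d.insert key val, some key)).1 =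
      pvGroup (pvCollect (ls.map PySem.Str.strip) val).2
        (d.insert key (pvCollect (ls.map PySem.Str.strip) val).1) := by
  induction ls with
  | nil => intro d key val; simp [pvCollect, pvGroup]
  | cons l rest ih =>
    intro d key val
    simp only [List.foldl_cons, pvStepA_eq, List.map_cons, pvCollect]
    cases hc : pvClassify (PySem.Str.strip l) with
    | some kv =>
      obtain ⟨k1, v1⟩ := kv
      rw [ih (d.insert key val) k1 v1]
      simp [pvGroup, hc]
    | none =>
      by_cases hne : PySem.Str.strip l = ""
      · simp [hne, ih d key val]
      · simp only [ne_eq, hne, not_false_iff, if_pos, pv_modify_insert]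
        exact ih d key (val ++ " " ++ PySem.Str.strip l)

-- main agreement: A's fold from (d, None) over raw lines is B's grouping over the stripped lines.
lemma pv_main (ls : List String) :
    ∀ (d : PySem.Dict String String),
    (ls.foldl pvStepA (d, none)).1 = pvGroup (ls.map PySem.Str.strip) d := by
  induction ls with
  | nil => intro d; simp [pvGroup]
  | cons l rest ih =>
    intro d
    simp only [List.foldl_cons, pvStepA_eq, List.map_cons]
    cases hc : pvClassify (PySem.Str.strip l) with
    | some kv =>
      obtain ⟨k1, v1⟩ := kv
      rw [pv_block_eq rest d k1 v1]
      simp [pvGroup, hc]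
    | none => simp [hc, pvGroup, ih d]

-- ===== VERDICT (by name: the statement is the Claim_ definition above) =====
theorem extract_analysis_sections_spec : Claim_equal_extract_analysis_sections := by
  intro content _
  unfold Spec_extract_analysis_sections extract_analysis_sections extract_analysis_sections_alt
  simp only [pv_main]
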